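-- pv_equiv track=rewrite | github.com/omukazu/Othello-AI | scripts/restore_from_data.py | _reversible
-- ===== SOURCE A (Python) =====
-- from enum import IntEnum
--
-- def _reversible(next_move: int,
--                 player: int,
--                 masked_blank: int,
--                 direction: IntEnum
--                 ) -> int:
--     one_reversible_mask = 0
--     # ~(player | masked_blank) ... candidates of reversible disc
--     one_temp = ~(player | masked_blank) & (next_move << direction)
--     if one_temp:
--         for i in range(6):
--             one_temp <<= direction
--             # can not reverse due to opponent being put between player and blank
--             if one_temp & masked_blank:
--                 break
--             elif one_temp & player:
--                 one_reversible_mask |= one_temp >> direction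
--                 break
--             else:
--                 one_temp |= one_temp >> direction
--
--     the_other_reversible_mask = 0
--     temp = ~(player | masked_blank) & (next_move >> direction)
--     if temp:
--         for i in range(6):
--             temp >>= direction
--             if temp & masked_blank:
--                 break
--             elif temp & player:
--                 the_other_reversible_mask |= temp << direction
--                 break
--             else:
--                 temp |= temp << direction
--     return one_reversible_mask | the_other_reversible_mask
-- ===== SOURCE B (Python) =====
-- def _reversible(next_move: int,
--                 player: int,
--                 masked_blank: int,
--                 direction: int
--                 ) -> int:
--     candidates = ~(player | masked_blank)
--
--     def scan(seed, fwd, back):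
--         # record the whole scan trail first, then decide with first-hit indices
--         trail = []
--         c = seed
--         for _ in range(6):
--             c = fwd(c)
--             trail.append(c)
--         first_blank = next((i for i, x in enumerate(trail) if x & masked_blank), 6)
--         first_player = next((i for i, x in enumerate(trail) if x & player), 6)
--         if first_player < first_blank:
--             acc = 0
--             for x in trail[:first_player + 1]:
--                 acc |= x
--             return back(acc)
--         return 0
--
--     return (scan(candidates & (next_move << direction),
--                  lambda x: x << direction, lambda x: x >> direction)
--             | scan(candidates & (next_move >> direction),
--                    lambda x: x >> direction, lambda x: x << direction))
-- ===== Notes on version B (the rewrite author's own statement) =====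
-- stated objective: alternative
-- what changed: Replaces A's self-growing mask (one_temp |= one_temp >> direction inside a stateful break-loop, duplicated per direction) by one shared scan helper that first records the 6-step shift trail as a list, then decides via the first-hit indices of blank and player and ORs a prefix of the trail, shifted back once.
import Mathlib
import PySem

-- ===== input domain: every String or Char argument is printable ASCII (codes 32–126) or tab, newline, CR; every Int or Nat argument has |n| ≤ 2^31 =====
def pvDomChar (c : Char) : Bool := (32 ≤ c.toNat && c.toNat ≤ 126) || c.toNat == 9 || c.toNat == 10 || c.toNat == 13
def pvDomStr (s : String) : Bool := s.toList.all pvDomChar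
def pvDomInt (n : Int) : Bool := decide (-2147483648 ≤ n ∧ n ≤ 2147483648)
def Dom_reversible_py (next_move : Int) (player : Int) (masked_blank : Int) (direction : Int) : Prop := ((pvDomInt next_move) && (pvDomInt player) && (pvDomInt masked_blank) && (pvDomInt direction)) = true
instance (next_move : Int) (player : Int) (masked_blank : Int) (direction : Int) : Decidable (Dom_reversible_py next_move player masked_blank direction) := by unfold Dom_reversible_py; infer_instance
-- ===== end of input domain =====

-- B replaces A's self-growing-mask break-loop (duplicated per direction) by one shared
-- trail-list scan decided via first-hit indices; proved equal to A wherever A returns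
-- (direction ≥ 0; Python raises ValueError on a negative shift count).


-- ===== PORT A =====
-- A's break-loop `for i in range(6)`, one copy per scan direction f (g is the opposite
-- shift); the single `one_reversible_mask |=` before the break becomes the return value.
def revLoopA (f g : Int → Int) (player masked_blank : Int) : Nat → Int → Int
  | 0, _ => 0
  | n+1, t =>
    let t' := f t
    if Int.land t' masked_blank ≠ 0 then 0
    else if Int.land t' player ≠ 0 then g t'
    else revLoopA f g player masked_blank n (Int.lor t' (g t'))

def reversible_py (next_move : Int) (player : Int) (masked_blank : Int) (direction : Int) : Int :=
  let d := direction.toNat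
  let one_temp := Int.land (Int.lnot (Int.lor player masked_blank)) (next_move <<< d)
  let one_reversible_mask :=
    if one_temp ≠ 0 then revLoopA (· <<< d) (· >>> d) player masked_blank 6 one_temp else 0
  let temp := Int.land (Int.lnot (Int.lor player masked_blank)) (next_move >>> d)
  let the_other_reversible_mask :=
    if temp ≠ 0 then revLoopA (· >>> d) (· <<< d) player masked_blank 6 temp else 0
  Int.lor one_reversible_mask the_other_reversible_mask

-- ===== PORT B =====
-- Source B's `scan`: record the 6-step trail, take first-hit indices (Python's
-- `next(…, 6)` = List.findIdx, which returns the length 6 when nothing matches),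
-- then OR a prefix of the trail and shift it back once.
def revTrail (f : Int → Int) : Nat → Int → List Int
  | 0, _ => []
  | n+1, c => let c' := f c; c' :: revTrail f n c'

def revScan (f g : Int → Int) (player masked_blank : Int) (seed : Int) : Int :=
  let trail := revTrail f 6 seed
  let first_blank := trail.findIdx (fun x => Int.land x masked_blank != 0)
  let first_player := trail.findIdx (fun x => Int.land x player != 0)
  if first_player < first_blank then
    g ((trail.take (first_player + 1)).foldl Int.lor 0)
  else 0

def reversible_py_alt (next_move : Int) (player : Int) (masked_blank : Int) (direction : Int) : Int :=
  let d := direction.toNat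
  let candidates := Int.lnot (Int.lor player masked_blank)
  Int.lor
    (revScan (· <<< d) (· >>> d) player masked_blank (Int.land candidates (next_move <<< d)))
    (revScan (· >>> d) (· <<< d) player masked_blank (Int.land candidates (next_move >>> d)))

-- ===== PRECONDITION & SPEC =====
-- Pre_ excludes exactly direction < 0, where Python's `<<`/`>>` raise ValueError.
def Pre_reversible_py (next_move : Int) (player : Int) (masked_blank : Int) (direction : Int) : Prop :=
  0 ≤ direction
instance (next_move : Int) (player : Int) (masked_blank : Int) (direction : Int) : Decidable (Pre_reversible_py next_move player masked_blank direction) := by unfold Pre_reversible_py; infer_instance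
def pvWitness_reversible_py : Int × Int × Int × Int := (1, 4, 0, 1)

def Spec_reversible_py (next_move : Int) (player : Int) (masked_blank : Int) (direction : Int) (out : Int) : Prop := out = reversible_py_alt next_move player masked_blank direction
instance (next_move : Int) (player : Int) (masked_blank : Int) (direction : Int) (out : Int) : Decidable (Spec_reversible_py next_move player masked_blank direction out) := by unfold Spec_reversible_py; infer_instance

-- ===== CLAIM (what is proved, stated in full; the proofs are below) =====
def Claim_equal_reversible_py : Prop := ∀ (next_move : Int) (player : Int) (masked_blank : Int) (direction : Int), Dom_reversible_py next_move player masked_blank direction → Pre_reversible_py next_move player masked_blank direction → Spec_reversible_py next_move player masked_blank direction (reversible_py next_move player masked_blank direction)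

-- ===== LEMMAS AND PROOFS =====

-- testBit extensionality for Int and the small bitwise algebra the proof needs
theorem pvTestBit_zero (k : Nat) : Int.testBit 0 k = false := Nat.zero_testBit k

theorem pvExt {m n : Int} (h : ∀ k, Int.testBit m k = Int.testBit n k) : m = n := by
  cases m with
  | ofNat a =>
    cases n with
    | ofNat b =>
      exact congrArg Int.ofNat (Nat.eq_of_testBit_eq (fun k => h k))
    | negSucc b =>
      exfalso
      have ha : Nat.testBit a (a + b) = false :=
        Nat.testBit_lt_two_pow (lt_of_lt_of_le Nat.lt_two_pow_self
          (Nat.pow_le_pow_right (by norm_num) (Nat.le_add_right a b)))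
      have hb : Nat.testBit b (a + b) = false :=
        Nat.testBit_lt_two_pow (lt_of_lt_of_le Nat.lt_two_pow_self
          (Nat.pow_le_pow_right (by norm_num) (Nat.le_add_left b a)))
      have := h (a + b)
      simp only [Int.testBit, ha, hb] at this
      exact absurd this (by simp)
  | negSucc a =>
    cases n with
    | ofNat b =>
      exfalso
      have ha : Nat.testBit a (a + b) = false :=
        Nat.testBit_lt_two_pow (lt_of_lt_of_le Nat.lt_two_pow_self
          (Nat.pow_le_pow_right (by norm_num) (Nat.le_add_right a b)))
      have hb : Nat.testBit b (a + b) = false :=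
        Nat.testBit_lt_two_pow (lt_of_lt_of_le Nat.lt_two_pow_self
          (Nat.pow_le_pow_right (by norm_num) (Nat.le_add_left b a)))
      have := h (a + b)
      simp only [Int.testBit, ha, hb] at this
      exact absurd this (by simp)
    | negSucc b =>
      refine congrArg Int.negSucc (Nat.eq_of_testBit_eq (fun k => ?_))
      have := h k
      simp only [Int.testBit] at this
      exact Bool.not_inj this

theorem pvZeroLor (x : Int) : Int.lor 0 x = x := by
  refine pvExt (fun k => ?_)
  simp [Int.testBit_lor, pvTestBit_zero]

theorem pvLorZero (x : Int) : Int.lor x 0 = x := by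
  refine pvExt (fun k => ?_)
  simp [Int.testBit_lor, pvTestBit_zero]

theorem pvLorComm (x y : Int) : Int.lor x y = Int.lor y x := by
  refine pvExt (fun k => ?_)
  simp [Int.testBit_lor, Bool.or_comm]

theorem pvLorAssoc (x y z : Int) : Int.lor (Int.lor x y) z = Int.lor x (Int.lor y z) := by
  refine pvExt (fun k => ?_)
  simp [Int.testBit_lor, Bool.or_assoc]

theorem pvLorLeftComm (x y z : Int) : Int.lor x (Int.lor y z) = Int.lor y (Int.lor x z) := by
  refine pvExt (fun k => ?_)
  simp [Int.testBit_lor]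
  cases Int.testBit x k <;> cases Int.testBit y k <;> simp

theorem pvLorSelf (x : Int) : Int.lor x x = x := by
  refine pvExt (fun k => ?_)
  simp [Int.testBit_lor]

theorem pvLorSelfLeft (x y : Int) : Int.lor x (Int.lor x y) = Int.lor x y := by
  rw [← pvLorAssoc, pvLorSelf]

theorem pvZeroLand (b : Int) : Int.land 0 b = 0 := by
  refine pvExt (fun k => ?_)
  simp [Int.testBit_land, pvTestBit_zero]

theorem pvLandLorRight (x y b : Int) :
    Int.land (Int.lor x y) b = Int.lor (Int.land x b) (Int.land y b) := by
  refine pvExt (fun k => ?_)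
  simp [Int.testBit_land, Int.testBit_lor, Bool.and_or_distrib_right]

-- shifts: distribution over lor and exact round trip
theorem pvTwoMulLor (x y : Int) : 2 * Int.lor x y = Int.lor (2 * x) (2 * y) := by
  have h := Int.lor_bit false x false y
  simp only [Int.bit_val, Bool.or_false, cond_false, add_zero] at h
  exact h.symm

theorem pvShlLor (d : Nat) (x y : Int) :
    Int.lor x y <<< d = Int.lor (x <<< d) (y <<< d) := by
  induction d with
  | zero => simp [Int.shiftLeft_eq]
  | succ n ih =>
    simp only [Int.shiftLeft_eq, pow_succ] at *
    calc Int.lor x y * (2 ^ n * 2) = (Int.lor x y * 2 ^ n) * 2 := by ring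
      _ = Int.lor (x * 2 ^ n) (y * 2 ^ n) * 2 := by rw [ih]
      _ = 2 * Int.lor (x * 2 ^ n) (y * 2 ^ n) := by ring
      _ = Int.lor (2 * (x * 2 ^ n)) (2 * (y * 2 ^ n)) := pvTwoMulLor _ _
      _ = Int.lor (x * (2 ^ n * 2)) (y * (2 ^ n * 2)) := by ring_nf

theorem pvDiv2Lor (x y : Int) : Int.div2 (Int.lor x y) = Int.lor (Int.div2 x) (Int.div2 y) := by
  conv_lhs => rw [← Int.bit_decomp x, ← Int.bit_decomp y]
  rw [Int.lor_bit, Int.div2_bit]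

theorem pvShrOne (x : Int) : x >>> (1 : Nat) = Int.div2 x := by
  rw [Int.shiftRight_eq_div_pow, Int.div2_val]
  norm_num

theorem pvShrLor (d : Nat) (x y : Int) :
    Int.lor x y >>> d = Int.lor (x >>> d) (y >>> d) := by
  induction d with
  | zero =>
    simp only [Int.shiftRight_eq_div_pow, pow_zero, Nat.cast_one, Int.ediv_one]
  | succ n ih =>
    have h : ∀ z : Int, z >>> (n + 1) = Int.div2 (z >>> n) := fun z => by
      rw [Int.shiftRight_add, pvShrOne]
    rw [h, h, h, ih, pvDiv2Lor]

theorem pvShlShr (d : Nat) (x : Int) : x <<< d >>> d = x := by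
  rw [Int.shiftLeft_eq, Int.shiftRight_eq_div_pow]
  push_cast
  exact Int.mul_ediv_cancel x (by positivity)

-- prefix-OR accumulation
theorem pvFoldlLor (l : List Int) : ∀ a b : Int,
    l.foldl Int.lor (Int.lor a b) = Int.lor a (l.foldl Int.lor b) := by
  induction l with
  | nil => intro a b; rfl
  | cons x xs ih =>
    intro a b
    simp only [List.foldl_cons]
    rw [pvLorAssoc, ih]

-- B's scan as a cursor/accumulator recursion (proof-side bridge between the two ports)
def revRec (f g : Int → Int) (p b : Int) : Nat → Int → Int → Int
  | 0, _, _ => 0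
  | n+1, c, U =>
    let c' := f c
    let U' := Int.lor U c'
    if Int.land c' b ≠ 0 then 0
    else if Int.land c' p ≠ 0 then g U'
    else revRec f g p b n c' U'

theorem pvScanRec (f g : Int → Int) (p b : Int) : ∀ (n : Nat) (c U : Int),
    (if (revTrail f n c).findIdx (fun x => Int.land x p != 0) <
        (revTrail f n c).findIdx (fun x => Int.land x b != 0) then
      g (Int.lor U (((revTrail f n c).take
        ((revTrail f n c).findIdx (fun x => Int.land x p != 0) + 1)).foldl Int.lor 0))
    else 0) = revRec f g p b n c U := by
  intro n
  induction n with
  | zero => intro c U; simp [revTrail, revRec]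
  | succ m ih =>
    intro c U
    simp only [revTrail, revRec]
    by_cases hb : Int.land (f c) b ≠ 0
    · have hb' : (fun x => Int.land x b != 0) (f c) = true := by simpa using hb
      by_cases hp : Int.land (f c) p ≠ 0
      · have hp' : (fun x => Int.land x p != 0) (f c) = true := by simpa using hp
        simp [List.findIdx_cons, hb', hp', hb]
      · have hp' : (fun x => Int.land x p != 0) (f c) = false := by simpa using hp
        simp [List.findIdx_cons, hb', hp', hb]
    · have hb' : (fun x => Int.land x b != 0) (f c) = false := by simpa using hb
      by_cases hp : Int.land (f c) p ≠ 0
      · have hp' : (fun x => Int.land x p != 0) (f c) = true := by simpa using hp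
        simp [List.findIdx_cons, hb', hp', hb, hp, pvZeroLor]
      · have hp' : (fun x => Int.land x p != 0) (f c) = false := by simpa using hp
        simp only [List.findIdx_cons, hb', hp', cond_false, Nat.add_lt_add_iff_right,
          List.take_succ_cons, List.foldl_cons, hb, hp]
        simp only [if_false]
        rw [← ih (f c) (Int.lor U (f c))]
        by_cases hlt : (revTrail f m (f c)).findIdx (fun x => Int.land x p != 0) <
            (revTrail f m (f c)).findIdx (fun x => Int.land x b != 0)
        · rw [if_pos hlt, if_pos hlt]
          congr 1
          have hf := pvFoldlLor ((revTrail f m (f c)).take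
            ((revTrail f m (f c)).findIdx (fun x => Int.land x p != 0) + 1)) (f c) 0
          rw [pvLorZero] at hf
          rw [pvZeroLor, hf, ← pvLorAssoc]
        · rw [if_neg hlt, if_neg hlt]

theorem pvLoopRec (f g : Int → Int) (p b : Int)
    (hfor : ∀ x y, f (Int.lor x y) = Int.lor (f x) (f y))
    (hc : ∀ x, f (g (f x)) = f x) :
    ∀ (n : Nat) (t c U : Int), Int.land U b = 0 → Int.land U p = 0 →
      f t = Int.lor U (f c) →
      Int.lor (f U) (Int.lor U (f c)) = Int.lor U (f c) →
      revLoopA f g p b n t = revRec f g p b n c U := by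
  intro n
  induction n with
  | zero => intro t c U _ _ _ _; rfl
  | succ m ih =>
    intro t c U hUb hUp hft habs
    simp only [revLoopA, revRec]
    rw [hft]
    rw [pvLandLorRight, hUb, pvZeroLor, pvLandLorRight, hUp, pvZeroLor]
    by_cases hb : Int.land (f c) b ≠ 0
    · rw [if_pos hb, if_pos hb]
    · rw [if_neg hb, if_neg hb]
      by_cases hp : Int.land (f c) p ≠ 0
      · rw [if_pos hp, if_pos hp]
      · rw [if_neg hp, if_neg hp]
        rw [not_ne_iff] at hb hp
        apply ih
        · rw [pvLandLorRight, hUb, hb, pvZeroLor]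
        · rw [pvLandLorRight, hUp, hp, pvZeroLor]
        · -- f (lor (f t) (g (f t))) = lor (lor U (f c)) (f (f c))
          rw [hfor, ← hft, hc, hft, hfor, ← habs]
          simp [pvLorComm, pvLorLeftComm, pvLorSelfLeft]
        · -- absorption is preserved
          rw [hfor, ← habs]
          simp [pvLorComm, pvLorLeftComm, pvLorSelf]

theorem pvScanZero (f g : Int → Int) (p b : Int) (hf0 : f 0 = 0) :
    revScan f g p b 0 = 0 := by
  have h : ∀ y : Int, (Int.land 0 y != 0) = false := by intro y; simp [pvZeroLand]
  simp [revScan, revTrail, hf0, List.findIdx_cons, h]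

theorem pvDirEq (f g : Int → Int) (p b : Int)
    (hfor : ∀ x y, f (Int.lor x y) = Int.lor (f x) (f y))
    (hf0 : f 0 = 0)
    (hc : ∀ x, f (g (f x)) = f x) (t0 : Int) :
    (if t0 ≠ 0 then revLoopA f g p b 6 t0 else 0) = revScan f g p b t0 := by
  by_cases h0 : t0 = 0
  · rw [if_neg (by simpa using h0), h0, pvScanZero f g p b hf0]
  · rw [if_pos h0]
    have hscan : revScan f g p b t0 = revRec f g p b 6 t0 0 := by
      rw [← pvScanRec f g p b 6 t0 0]
      simp only [revScan, pvZeroLor]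
    rw [hscan]
    apply pvLoopRec f g p b hfor hc
    · exact pvZeroLand b
    · exact pvZeroLand p
    · rw [pvZeroLor]
    · rw [pvZeroLor, hf0, pvZeroLor]

-- ===== VERDICT (by name: the statement is the Claim_ definition above) =====
theorem reversible_py_spec : Claim_equal_reversible_py := by
  intro next_move player masked_blank direction _ _
  unfold Spec_reversible_py reversible_py reversible_py_alt
  simp only []
  congr 1
  · exact pvDirEq (· <<< direction.toNat) (· >>> direction.toNat) player masked_blank
      (pvShlLor direction.toNat) (Int.zero_shiftLeft direction.toNat)
      (fun x => by simp only [pvShlShr]) _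
  · exact pvDirEq (· >>> direction.toNat) (· <<< direction.toNat) player masked_blank
      (pvShrLor direction.toNat) (Int.zero_shiftRight direction.toNat)
      (fun x => by simp only [pvShlShr]) _
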